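-- pv_equiv track=rewrite | github.com/poserko/Advent-of-Code | 2023/AoC_day11_p1.py | add_cols
-- ===== SOURCE A (Python) =====
-- def add_cols(index_cols, matrix):
--     index_increment = 0
--     for index in index_cols:
--         act_index = index_increment + index
--         index_increment += 1
--
--         for row in matrix:
--             row.insert(act_index, '.')
--
--     return matrix
-- ===== SOURCE B (Python) =====
-- # B: precomputes, once per distinct row length, the final positions of all inserted
-- # '.' columns (cached in a dict), then builds each output row in one pass with no
-- # list.insert shifting.  A mutates matrix in place and returns it; B returns a
-- # fresh matrix with the same value (return-value equivalence only).
-- def add_cols(index_cols, matrix):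
--     def norm(i, n):
--         if i < 0:
--             i += n
--         if i < 0:
--             i = 0
--         elif i > n:
--             i = n
--         return i
--     cache = {}
--     out = []
--     for row in matrix:
--         L = len(row)
--         dots = cache.get(L)
--         if dots is None:
--             finals = []
--             for k, c in enumerate(index_cols):
--                 p = norm(c + k, L + k)
--                 finals = [f + 1 if f >= p else f for f in finals] + [p]
--             dots = set(finals)
--             cache[L] = dots
--         it = iter(row)
--         out.append(['.' if i in dots else next(it) for i in range(L + len(index_cols))])
--     return out
-- ===== Notes on version B (the rewrite author's own statement) =====
-- stated objective: alternative
-- what changed: Instead of performing k list.insert shifts on every row, B precomputes (once per distinct row length, cached in a dict) the final positions of all inserted '.' columns by integer arithmetic and then builds each output row in a single pass; A mutates matrix in place while B returns a fresh matrix with the same value (return-value equivalence).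
import Mathlib
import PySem

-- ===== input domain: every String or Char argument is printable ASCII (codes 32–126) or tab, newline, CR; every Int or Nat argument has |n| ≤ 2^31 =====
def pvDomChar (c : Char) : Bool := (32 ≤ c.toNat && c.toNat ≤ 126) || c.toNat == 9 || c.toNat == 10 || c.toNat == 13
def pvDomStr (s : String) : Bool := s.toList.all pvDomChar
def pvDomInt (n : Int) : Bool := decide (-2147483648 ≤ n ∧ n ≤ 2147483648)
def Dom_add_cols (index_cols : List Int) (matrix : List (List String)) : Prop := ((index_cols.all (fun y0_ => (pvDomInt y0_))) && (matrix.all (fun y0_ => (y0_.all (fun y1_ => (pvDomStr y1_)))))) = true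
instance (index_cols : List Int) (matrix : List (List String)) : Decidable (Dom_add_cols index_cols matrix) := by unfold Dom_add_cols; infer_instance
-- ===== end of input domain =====

-- B precomputes, once per distinct row length, the final positions of the inserted '.' columns
-- and builds each output row in one pass, a different algorithm from A's repeated list.insert
-- (A mutates matrix in place and returns it; the equivalence is about the return value only).

-- ===== PORT A =====
def add_cols (index_cols : List Int) (matrix : List (List String)) : List (List String) :=
  (index_cols.foldl
    (fun (st : Int × List (List String)) index =>
      (st.1 + 1, st.2.map (fun row => PySem.List.insert row (st.1 + index) ".")))
    (0, matrix)).2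

-- ===== PORT B =====
-- Source B's local helper norm: Python's list.insert index normalisation
def normIns (i n : Int) : Int :=
  if i < 0 then
    (if i + n < 0 then 0 else if i + n > n then n else i + n)
  else
    (if i < 0 then 0 else if i > n then n else i)

def add_cols_alt (index_cols : List Int) (matrix : List (List String)) : List (List String) :=
  (matrix.foldl
    (fun (st : PySem.Dict Int (List Int) × List (List String)) row =>
      let L : Int := (row.length : Int)
      let cd : PySem.Dict Int (List Int) × List Int :=
        match PySem.Dict.get? st.1 L with
        | some d => (st.1, d)
        | none =>
          let finals := (PySem.List.enumerate index_cols).foldl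
            (fun (finals : List Int) kc =>
              let p := normIns (kc.2 + kc.1) (L + kc.1)
              finals.map (fun f => if f ≥ p then f + 1 else f) ++ [p]) []
          let dots := PySem.Set.ofList finals
          (PySem.Dict.insert st.1 L dots, dots)
      let newRow := ((PySem.List.pyRange 0 (L + (index_cols.length : Int)) 1).foldl
        (fun (bs : List String × List String) i =>
          if i ∈ cd.2 then (bs.1 ++ ["."], bs.2)
          else match bs.2 with
            | [] => (bs.1, ([] : List String))
            | x :: xs => (bs.1 ++ [x], xs)) ([], row)).1
      (cd.1, st.2 ++ [newRow]))
    (PySem.Dict.empty, [])).2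

-- ===== PRECONDITION & SPEC =====
def Spec_add_cols (index_cols : List Int) (matrix : List (List String)) (out : List (List String)) : Prop := out = add_cols_alt index_cols matrix
instance (index_cols : List Int) (matrix : List (List String)) (out : List (List String)) : Decidable (Spec_add_cols index_cols matrix out) := by unfold Spec_add_cols; infer_instance

-- ===== CLAIM (what is proved, stated in full; the proofs are below) =====
def Claim_equal_add_cols : Prop := ∀ (index_cols : List Int) (matrix : List (List String)), Dom_add_cols index_cols matrix → Spec_add_cols index_cols matrix (add_cols index_cols matrix)

-- ===== LEMMAS AND PROOFS =====

-- insert at a (clamped) natural position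
def insAt {α : Type} (p : Nat) (v : α) (xs : List α) : List α := xs.take p ++ v :: xs.drop p

-- one-pass assembly: t slots starting at slot i, '.' on slots in D, else consume r
def asmGo (D : List Int) : List String → Nat → Nat → List String
  | _, _, 0 => []
  | r, i, t+1 =>
    if (i : Int) ∈ D then "." :: asmGo D r (i+1) t
    else match r with
      | [] => asmGo D [] (i+1) t
      | x :: xs => x :: asmGo D xs (i+1) t

-- the finals loop of Source B, over raw insert positions, carrying the current length n
def floop : List Int → List Int → Int → List Int
  | [], D, _ => D
  | q :: qs, D, n =>
    let p := normIns q n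
    floop qs (D.map (fun f => if f ≥ p then f + 1 else f) ++ [p]) (n + 1)

-- number of dot slots in the window [i, i+t)
def cnt (D : List Int) (i t : Nat) : Nat := (List.range' i t).countP (fun (s : Nat) => decide ((s:Int) ∈ D))

-- the raw insert positions A and B both use (offset k added to the k-th column index)
def qsOf (index_cols : List Int) : List Int :=
  (PySem.List.enumerate index_cols).map (fun kc => kc.1 + kc.2)

def finalsOf (index_cols : List Int) (L : Nat) : List Int := floop (qsOf index_cols) [] (L:Int)

def rowFn (index_cols : List Int) (row : List String) : List String :=
  asmGo (finalsOf index_cols row.length) row 0 (row.length + index_cols.length)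

-- the step function of B's fold over the matrix (definitionally the lambda in add_cols_alt)
def altStep (index_cols : List Int)
    (st : PySem.Dict Int (List Int) × List (List String)) (row : List String) :
    PySem.Dict Int (List Int) × List (List String) :=
  let L : Int := (row.length : Int)
  let cd : PySem.Dict Int (List Int) × List Int :=
    match PySem.Dict.get? st.1 L with
    | some d => (st.1, d)
    | none =>
      let finals := (PySem.List.enumerate index_cols).foldl
        (fun (finals : List Int) kc =>
          let p := normIns (kc.2 + kc.1) (L + kc.1)
          finals.map (fun f => if f ≥ p then f + 1 else f) ++ [p]) []
      let dots := PySem.Set.ofList finals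
      (PySem.Dict.insert st.1 L dots, dots)
  let newRow := ((PySem.List.pyRange 0 (L + (index_cols.length : Int)) 1).foldl
    (fun (bs : List String × List String) i =>
      if i ∈ cd.2 then (bs.1 ++ ["."], bs.2)
      else match bs.2 with
        | [] => (bs.1, ([] : List String))
        | x :: xs => (bs.1 ++ [x], xs)) ([], row)).1
  (cd.1, st.2 ++ [newRow])

lemma normIns_bounds (i n : Int) (hn : 0 ≤ n) : 0 ≤ normIns i n ∧ normIns i n ≤ n := by
  unfold normIns; split_ifs <;> omega

lemma insert_eq_insAt (xs : List String) (q : Int) (v : String) :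
    PySem.List.insert xs q v = insAt (normIns q (xs.length:Int)).toNat v xs := by
  have h : (if q < 0 then max (q + (xs.length:Int)) 0 else min q (xs.length:Int))
      = normIns q (xs.length:Int) := by
    unfold normIns; split_ifs <;> omega
  simp only [PySem.List.insert, PySem.List.sliceIndices, insAt]
  norm_num
  rw [h]

lemma insAt_zero {α : Type} (v : α) (xs : List α) : insAt 0 v xs = v :: xs := by
  simp [insAt]

lemma insAt_succ_cons {α : Type} (k : Nat) (v a : α) (xs : List α) :
    insAt (k+1) v (a :: xs) = a :: insAt k v xs := by
  simp [insAt]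

lemma mem_shift_append (j p : Int) (D : List Int) :
    j ∈ (D.map (fun f => if f ≥ p then f + 1 else f) ++ [p]) ↔
      j = p ∨ (j < p ∧ j ∈ D) ∨ (p < j ∧ j - 1 ∈ D) := by
  simp only [List.mem_append, List.mem_map, List.mem_singleton]
  constructor
  · rintro (⟨f, hfD, hj⟩ | rfl)
    · by_cases h : p ≤ f
      · rw [if_pos h] at hj
        right; right
        refine ⟨by omega, ?_⟩
        have : j - 1 = f := by omega
        rw [this]; exact hfD
      · rw [if_neg h] at hj
        right; left
        exact ⟨by omega, hj ▸ hfD⟩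
    · exact Or.inl rfl
  · rintro (rfl | ⟨hlt, hD⟩ | ⟨hgt, hD⟩)
    · exact Or.inr rfl
    · exact Or.inl ⟨j, hD, if_neg (by omega)⟩
    · refine Or.inl ⟨j - 1, hD, ?_⟩
      rw [if_pos (by omega)]; omega

lemma nodup_shift_append (p : Int) (D : List Int) (h : D.Nodup) :
    (D.map (fun f => if f ≥ p then f + 1 else f) ++ [p]).Nodup := by
  refine List.Nodup.append ?_ (List.nodup_singleton p) ?_
  · refine List.Nodup.map_on ?_ h
    intro x _ y _ hxy
    split_ifs at hxy <;> omega
  · intro a ha hb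
    simp only [List.mem_singleton] at hb
    subst hb
    simp only [List.mem_map] at ha
    obtain ⟨f, _, hf⟩ := ha
    split_ifs at hf <;> omega

lemma shift_bounds (p : Int) (D : List Int) (T : Nat) (hp0 : 0 ≤ p) (hpT : p ≤ (T:Int))
    (hb : ∀ f ∈ D, 0 ≤ f ∧ f < (T:Int)) :
    ∀ f ∈ (D.map (fun f => if f ≥ p then f + 1 else f) ++ [p]), 0 ≤ f ∧ f < ((T:Int) + 1) := by
  intro f hf
  rw [mem_shift_append] at hf
  rcases hf with rfl | ⟨hlt, hmem⟩ | ⟨hgt, hmem⟩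
  · omega
  · have := hb f hmem; omega
  · have := hb (f-1) hmem; omega

lemma asmGo_pos (D : List Int) (r : List String) (i t : Nat) (h : (i:Int) ∈ D) :
    asmGo D r i (t+1) = "." :: asmGo D r (i+1) t := by
  cases r <;> simp [asmGo, h]

lemma asmGo_neg_nil (D : List Int) (i t : Nat) (h : (i:Int) ∉ D) :
    asmGo D [] i (t+1) = asmGo D [] (i+1) t := by
  simp [asmGo, h]

lemma asmGo_neg_cons (D : List Int) (x : String) (xs : List String) (i t : Nat)
    (h : (i:Int) ∉ D) : asmGo D (x :: xs) i (t+1) = x :: asmGo D xs (i+1) t := by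
  simp [asmGo, h]

lemma asmGo_congr : ∀ (t i₁ i₂ : Nat) (r : List String) (D₁ D₂ : List Int),
    (∀ s, s < t → ((((i₁+s : Nat)) : Int) ∈ D₁ ↔ (((i₂+s : Nat)) : Int) ∈ D₂)) →
    asmGo D₁ r i₁ t = asmGo D₂ r i₂ t := by
  intro t
  induction t with
  | zero => intros; simp [asmGo]
  | succ t ih =>
    intro i₁ i₂ r D₁ D₂ h
    have h0 : ((i₁ : Int) ∈ D₁ ↔ (i₂ : Int) ∈ D₂) := by
      have := h 0 (by omega); simpa using this
    have hrec : ∀ (r' : List String), asmGo D₁ r' (i₁+1) t = asmGo D₂ r' (i₂+1) t := by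
      intro r'
      apply ih
      intro s hs
      have h1 : i₁ + 1 + s = i₁ + (s+1) := by omega
      have h2 : i₂ + 1 + s = i₂ + (s+1) := by omega
      rw [h1, h2]
      exact h (s+1) (by omega)
    by_cases hm : (i₁ : Int) ∈ D₁
    · have hm2 : (i₂ : Int) ∈ D₂ := h0.mp hm
      rw [asmGo_pos _ _ _ _ hm, asmGo_pos _ _ _ _ hm2, hrec]
    · have hm2 : (i₂ : Int) ∉ D₂ := fun hc => hm (h0.mpr hc)
      cases r with
      | nil => rw [asmGo_neg_nil _ _ _ hm, asmGo_neg_nil _ _ _ hm2, hrec]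
      | cons x xs => rw [asmGo_neg_cons _ _ _ _ _ hm, asmGo_neg_cons _ _ _ _ _ hm2, hrec]

lemma cnt_succ (D : List Int) (i t : Nat) :
    cnt D i (t+1) = (if (i:Int) ∈ D then 1 else 0) + cnt D (i+1) t := by
  simp only [cnt, List.range'_succ, List.countP_cons]
  by_cases h : (i:Int) ∈ D
  · simp [h]
    omega
  · simp [h]

lemma cnt_le (D : List Int) (i t : Nat) : cnt D i t ≤ t := by
  have h1 : cnt D i t ≤ (List.range' i t).length := List.countP_le_length
  simpa using h1

lemma countP_or_disjoint : ∀ (l : List Nat) (p q : Nat → Bool),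
    (∀ s, ¬(p s = true ∧ q s = true)) →
    l.countP (fun s => p s || q s) = l.countP p + l.countP q := by
  intro l p q h
  induction l with
  | nil => simp
  | cons a l ih =>
    by_cases hp : p a = true
    · by_cases hq : q a = true
      · exact absurd ⟨hp, hq⟩ (h a)
      · simp only [Bool.not_eq_true] at hq
        simp [hp, hq, ih]
        omega
    · simp only [Bool.not_eq_true] at hp
      by_cases hq : q a = true
      · simp [hp, hq, ih]
        omega
      · simp only [Bool.not_eq_true] at hq
        simp [hp, hq, ih]

lemma countP_eq_one (d : Int) (T : Nat) (h0 : 0 ≤ d) (hT : d < (T:Int)) :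
    (List.range' 0 T).countP (fun (s : Nat) => decide ((s:Int) = d)) = 1 := by
  have he : (List.range' 0 T).countP (fun (s : Nat) => decide ((s:Int) = d))
      = (List.range' 0 T).count d.toNat := by
    rw [List.count]
    apply List.countP_congr
    intro a _
    simp only [decide_eq_true_eq, beq_iff_eq]
    omega
  rw [he]
  have hnd : (List.range' 0 T).Nodup := List.nodup_range'
  have hmem : d.toNat ∈ List.range' 0 T := by
    rw [List.mem_range']
    exact ⟨d.toNat, by omega, by omega⟩
  exact List.count_eq_one_of_mem hnd hmem

lemma cnt_full (D : List Int) (T : Nat) (hnd : D.Nodup)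
    (hb : ∀ f ∈ D, 0 ≤ f ∧ f < (T:Int)) : cnt D 0 T = D.length := by
  induction D with
  | nil => simp [cnt]
  | cons d Drest ih =>
    rw [List.nodup_cons] at hnd
    have hsplit : cnt (d :: Drest) 0 T
        = (List.range' 0 T).countP (fun (s : Nat) => decide ((s:Int) = d))
          + (List.range' 0 T).countP (fun (s : Nat) => decide ((s:Int) ∈ Drest)) := by
      rw [cnt, ← countP_or_disjoint]
      · apply List.countP_congr
        intro a _
        simp [List.mem_cons]
      · intro s hc
        simp only [decide_eq_true_eq] at hc
        exact hnd.1 (hc.1 ▸ hc.2)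
    rw [hsplit, countP_eq_one d T (hb d (by simp)).1 (hb d (by simp)).2]
    have h2 : (List.range' 0 T).countP (fun (s : Nat) => decide ((s:Int) ∈ Drest)) = Drest.length := by
      rw [← cnt]
      exact ih hnd.2 (fun f hf => hb f (by simp [hf]))
    rw [h2]
    simp [Nat.add_comm]

lemma asmGo_length : ∀ (t i : Nat) (r : List String) (D : List Int),
    cnt D i t + r.length = t → (asmGo D r i t).length = t := by
  intro t
  induction t with
  | zero => intros; simp [asmGo]
  | succ t ih =>
    intro i r D hc
    rw [cnt_succ] at hc
    by_cases hm : (i:Int) ∈ D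
    · rw [if_pos hm] at hc
      rw [asmGo_pos _ _ _ _ hm, List.length_cons, ih (i+1) r D (by omega)]
    · rw [if_neg hm] at hc
      cases r with
      | nil =>
        exfalso
        have := cnt_le D (i+1) t
        simp at hc
        omega
      | cons x xs =>
        rw [asmGo_neg_cons _ _ _ _ _ hm, List.length_cons,
          ih (i+1) xs D (by simp at hc ⊢; omega)]

lemma insAt_asmGo (p : Nat) (D : List Int) : ∀ (t i : Nat) (r : List String),
    i ≤ p → p ≤ i + t → cnt D i t + r.length = t →
    insAt (p - i) "." (asmGo D r i t) =
      asmGo (D.map (fun f => if f ≥ (p:Int) then f + 1 else f) ++ [(p:Int)]) r i (t+1) := by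
  intro t
  induction t with
  | zero =>
    intro i r h1 h2 hc
    have hip : p = i := by omega
    subst hip
    have hm : (p : Int) ∈ (D.map (fun f => if f ≥ (p:Int) then f + 1 else f) ++ [(p:Int)]) := by
      rw [mem_shift_append]; exact Or.inl rfl
    rw [Nat.sub_self, insAt_zero, asmGo_pos _ _ _ _ hm]
    simp [asmGo]
  | succ t ih =>
    intro i r h1 h2 hc
    rw [cnt_succ] at hc
    by_cases hip : p = i
    · subst hip
      have hm : (p : Int) ∈ (D.map (fun f => if f ≥ (p:Int) then f + 1 else f) ++ [(p:Int)]) := by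
        rw [mem_shift_append]; exact Or.inl rfl
      rw [Nat.sub_self, insAt_zero, asmGo_pos _ _ _ _ hm]
      congr 1
      apply asmGo_congr
      intro s _
      rw [mem_shift_append]
      constructor
      · intro h
        right; right
        refine ⟨by push_cast; omega, ?_⟩
        have he : ((p + 1 + s : Nat) : Int) - 1 = ((p + s : Nat) : Int) := by push_cast; omega
        rw [he]; exact h
      · rintro (habs | ⟨habs, _⟩ | ⟨_, h⟩)
        · exfalso; push_cast at habs; omega
        · exfalso; push_cast at habs; omega
        · have he : ((p + 1 + s : Nat) : Int) - 1 = ((p + s : Nat) : Int) := by push_cast; omega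
          rw [he] at h; exact h
    · have hilt : i < p := by omega
      by_cases hm : (i:Int) ∈ D
      · rw [if_pos hm] at hc
        have hm' : (i : Int) ∈ (D.map (fun f => if f ≥ (p:Int) then f + 1 else f) ++ [(p:Int)]) := by
          rw [mem_shift_append]
          right; left
          exact ⟨by omega, hm⟩
        have hsub : p - i = (p - (i+1)) + 1 := by omega
        rw [asmGo_pos _ _ _ _ hm, asmGo_pos _ _ _ _ hm', hsub, insAt_succ_cons,
          ih (i+1) r (by omega) (by omega) (by omega)]
      · rw [if_neg hm] at hc
        have hm' : (i : Int) ∉ (D.map (fun f => if f ≥ (p:Int) then f + 1 else f) ++ [(p:Int)]) := by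
          rw [mem_shift_append]
          rintro (habs | ⟨_, habs⟩ | ⟨habs, _⟩)
          · omega
          · exact hm habs
          · omega
        cases r with
        | nil =>
          exfalso
          have := cnt_le D (i+1) t
          simp at hc
          omega
        | cons x xs =>
          have hsub : p - i = (p - (i+1)) + 1 := by omega
          rw [asmGo_neg_cons _ _ _ _ _ hm, asmGo_neg_cons _ _ _ _ _ hm', hsub, insAt_succ_cons,
            ih (i+1) xs (by omega) (by omega) (by simp at hc ⊢; omega)]

lemma key (r : List String) : ∀ (qs : List Int) (D : List Int),
    D.Nodup → (∀ f ∈ D, 0 ≤ f ∧ f < ((r.length + D.length : Nat) : Int)) →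
    qs.foldl (fun cur q => PySem.List.insert cur q ".") (asmGo D r 0 (r.length + D.length))
      = asmGo (floop qs D ((r.length + D.length : Nat) : Int)) r 0 (r.length + D.length + qs.length) := by
  intro qs
  induction qs with
  | nil => intro D _ _; simp [floop]
  | cons q qs ih =>
    intro D hnd hb
    have hcnt : cnt D 0 (r.length + D.length) + r.length = r.length + D.length := by
      rw [cnt_full D (r.length + D.length) hnd hb]; omega
    have hlen : (asmGo D r 0 (r.length + D.length)).length = r.length + D.length :=
      asmGo_length _ _ _ _ hcnt
    obtain ⟨hp0, hpT⟩ :=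
      normIns_bounds q (((r.length + D.length : Nat)) : Int) (by positivity)
    have hcast : (((normIns q (((r.length + D.length : Nat)) : Int)).toNat : Nat) : Int)
        = normIns q (((r.length + D.length : Nat)) : Int) := Int.toNat_of_nonneg hp0
    have hins : PySem.List.insert (asmGo D r 0 (r.length + D.length)) q "."
        = insAt (normIns q (((r.length + D.length : Nat)) : Int)).toNat "."
            (asmGo D r 0 (r.length + D.length)) := by
      rw [insert_eq_insAt, hlen]
    have hstep := insAt_asmGo (normIns q (((r.length + D.length : Nat)) : Int)).toNat D
      (r.length + D.length) 0 r (by omega) (by omega) hcnt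
    rw [Nat.sub_zero] at hstep
    have hnd' := nodup_shift_append
      (((normIns q (((r.length + D.length : Nat)) : Int)).toNat : Nat) : Int) D hnd
    have hb0 := shift_bounds
      (((normIns q (((r.length + D.length : Nat)) : Int)).toNat : Nat) : Int) D
      (r.length + D.length) (by positivity) (by omega) hb
    have hresult := ih
      (D.map (fun f => if f ≥ (((normIns q (((r.length + D.length : Nat)) : Int)).toNat : Nat) : Int)
          then f + 1 else f)
        ++ [(((normIns q (((r.length + D.length : Nat)) : Int)).toNat : Nat) : Int)])
      hnd'
      (by
        intro f hf
        have hbf := hb0 f hf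
        refine ⟨hbf.1, ?_⟩
        simp only [List.length_append, List.length_map, List.length_cons, List.length_nil]
        push_cast at hbf ⊢
        omega)
    simp only [List.length_append, List.length_map, List.length_cons, List.length_nil] at hresult
    show List.foldl (fun cur q => PySem.List.insert cur q ".")
        (PySem.List.insert (asmGo D r 0 (r.length + D.length)) q ".") qs
      = asmGo (floop (q :: qs) D (((r.length + D.length : Nat)) : Int)) r 0
          (r.length + D.length + (qs.length + 1))
    rw [hins, hstep]
    have hfl : floop (q :: qs) D (((r.length + D.length : Nat)) : Int)
        = floop qs
            (D.map (fun f => if f ≥ (((normIns q (((r.length + D.length : Nat)) : Int)).toNat : Nat) : Int)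
                then f + 1 else f)
              ++ [(((normIns q (((r.length + D.length : Nat)) : Int)).toNat : Nat) : Int)])
            ((((r.length + D.length : Nat)) : Int) + 1) := by
      show floop qs
          (D.map (fun f => if f ≥ normIns q (((r.length + D.length : Nat)) : Int) then f + 1 else f)
            ++ [normIns q (((r.length + D.length : Nat)) : Int)])
          ((((r.length + D.length : Nat)) : Int) + 1) = _
      rw [hcast]
    rw [hfl]
    have e1 : ((((r.length + D.length : Nat)) : Int) + 1)
        = (((r.length + (D.length + 1) : Nat)) : Int) := by push_cast; ring
    have e2 : r.length + D.length + (qs.length + 1) = r.length + (D.length + 1) + qs.length := by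
      omega
    have e3 : r.length + D.length + 1 = r.length + (D.length + 1) := by omega
    rw [e1, e2, ← hresult, e3]

lemma asmGo_nil_dots : ∀ (r : List String) (i : Nat), asmGo [] r i r.length = r := by
  intro r
  induction r with
  | nil => intro i; simp [asmGo]
  | cons x xs ih => intro i; simp [asmGo, ih]

lemma a_per_row (xs : List Int) : ∀ (s : Int) (matrix : List (List String)),
    (xs.foldl
      (fun (st : Int × List (List String)) index =>
        (st.1 + 1, st.2.map (fun row => PySem.List.insert row (st.1 + index) ".")))
      (s, matrix)).2
    = matrix.map (fun row =>
        (PySem.List.enumerate xs s).foldl (fun r kc => PySem.List.insert r (kc.1 + kc.2) ".") row) := by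
  induction xs with
  | nil =>
    intro s matrix
    simp [PySem.List.enumerate_nil]
  | cons c xs ih =>
    intro s matrix
    simp only [List.foldl_cons, PySem.List.enumerate_cons]
    rw [ih (s+1)]
    rw [List.map_map]
    rfl

lemma qs_comm (xs : List Int) (s : Int) :
    (PySem.List.enumerate xs s).map (fun kc => kc.2 + kc.1)
      = (PySem.List.enumerate xs s).map (fun kc => kc.1 + kc.2) := by
  apply List.map_congr_left
  intro kc _
  exact Int.add_comm _ _

lemma rowA_eq_rowFn (index_cols : List Int) (row : List String) :
    (PySem.List.enumerate index_cols 0).foldl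
      (fun r kc => PySem.List.insert r (kc.1 + kc.2) ".") row = rowFn index_cols row := by
  have h1 : (PySem.List.enumerate index_cols 0).foldl
      (fun r kc => PySem.List.insert r (kc.1 + kc.2) ".") row
      = (qsOf index_cols).foldl (fun r q => PySem.List.insert r q ".") row := by
    rw [qsOf, List.foldl_map]
  have h3 := key row (qsOf index_cols) [] List.nodup_nil (by simp)
  simp only [List.length_nil, Nat.add_zero] at h3
  rw [asmGo_nil_dots row 0] at h3
  have hq : (qsOf index_cols).length = index_cols.length := by
    simp [qsOf, PySem.List.length_enumerate]
  rw [h1, h3, rowFn, finalsOf, hq]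

lemma range_fold_asmGo (D : List Int) : ∀ (t i : Nat) (acc r : List String),
    ((PySem.List.pyRange (i:Int) ((i + t : Nat):Int) 1).foldl
      (fun (bs : List String × List String) j =>
        if j ∈ D then (bs.1 ++ ["."], bs.2)
        else match bs.2 with
          | [] => (bs.1, ([] : List String))
          | x :: xs => (bs.1 ++ [x], xs)) (acc, r)).1 = acc ++ asmGo D r i t := by
  intro t
  induction t with
  | zero =>
    intro i acc r
    rw [PySem.List.pyRange_one_eq_nil (by push_cast; omega)]
    simp [asmGo]
  | succ t ih =>
    intro i acc r
    rw [PySem.List.pyRange_one_cons (by push_cast; omega)]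
    have hc1 : (i:Int) + 1 = (((i+1 : Nat)):Int) := by push_cast; ring
    have hc2 : ((i + (t+1) : Nat):Int) = (((i+1) + t : Nat):Int) := by push_cast; ring
    rw [List.foldl_cons, hc1, hc2]
    by_cases hm : (i:Int) ∈ D
    · simp only [if_pos hm]
      rw [ih (i+1) (acc ++ ["."]) r]
      rw [asmGo_pos _ _ _ _ hm]
      simp
    · cases r with
      | nil =>
        simp only [if_neg hm]
        rw [ih (i+1) acc []]
        rw [asmGo_neg_nil _ _ _ hm]
      | cons x xs =>
        simp only [if_neg hm]
        rw [ih (i+1) (acc ++ [x]) xs]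
        rw [asmGo_neg_cons _ _ _ _ _ hm]
        simp

lemma enum_fold_floop (L : Nat) : ∀ (xs : List Int) (s : Nat) (fin : List Int),
    (PySem.List.enumerate xs (s:Int)).foldl
      (fun (finals : List Int) kc =>
        finals.map (fun f => if f ≥ normIns (kc.2 + kc.1) ((L:Int) + kc.1) then f + 1 else f)
          ++ [normIns (kc.2 + kc.1) ((L:Int) + kc.1)]) fin
    = floop ((PySem.List.enumerate xs (s:Int)).map (fun kc => kc.2 + kc.1)) fin ((L:Int) + (s:Int)) := by
  intro xs
  induction xs with
  | nil => intro s fin; simp [PySem.List.enumerate_nil, floop]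
  | cons c xs ih =>
    intro s fin
    rw [PySem.List.enumerate_cons]
    simp only [List.foldl_cons, List.map_cons, floop]
    have hc : (s:Int) + 1 = (((s+1:Nat)):Int) := by push_cast; ring
    rw [hc, ih (s+1)]
    have hc2 : ((L:Int) + (((s+1:Nat)):Int)) = ((L:Int) + ((s:Nat):Int) + 1) := by push_cast; ring
    rw [hc2]

lemma rowB_eq_rowFn (index_cols : List Int) (row : List String) (dots : List Int)
    (hd : ∀ j : Int, j ∈ dots ↔ j ∈ finalsOf index_cols row.length) :
    ((PySem.List.pyRange 0 ((row.length:Int) + (index_cols.length : Int)) 1).foldl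
      (fun (bs : List String × List String) i =>
        if i ∈ dots then (bs.1 ++ ["."], bs.2)
        else match bs.2 with
          | [] => (bs.1, ([] : List String))
          | x :: xs => (bs.1 ++ [x], xs)) ([], row)).1 = rowFn index_cols row := by
  have hc0 : (0:Int) = ((0:Nat):Int) := rfl
  have hc1 : (row.length:Int) + (index_cols.length : Int)
      = ((0 + (row.length + index_cols.length) : Nat):Int) := by push_cast; ring
  rw [hc0, hc1, range_fold_asmGo dots (row.length + index_cols.length) 0 [] row]
  rw [List.nil_append, rowFn]
  apply asmGo_congr
  intro s _
  exact hd _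

lemma alt_fold (index_cols : List Int) : ∀ (matrix : List (List String))
    (cache : PySem.Dict Int (List Int)) (acc : List (List String)),
    (∀ (z : Int) (d : List Int), PySem.Dict.get? cache z = some d →
      ∃ n : Nat, z = (n:Int) ∧ ∀ j : Int, j ∈ d ↔ j ∈ finalsOf index_cols n) →
    (matrix.foldl (altStep index_cols) (cache, acc)).2 = acc ++ matrix.map (rowFn index_cols) := by
  intro matrix
  induction matrix with
  | nil => intro cache acc _; simp
  | cons row rest ih =>
    intro cache acc hinv
    rw [List.foldl_cons]
    cases hget : PySem.Dict.get? cache ((row.length : Int)) with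
    | some d =>
      obtain ⟨n, hz, hmem⟩ := hinv _ _ hget
      have hn : n = row.length := by exact_mod_cast hz.symm
      subst hn
      have hstep : altStep index_cols (cache, acc) row
          = (cache, acc ++ [rowFn index_cols row]) := by
        unfold altStep
        dsimp only
        rw [hget]
        dsimp only
        rw [rowB_eq_rowFn index_cols row d hmem]
      rw [hstep, ih cache (acc ++ [rowFn index_cols row]) hinv]
      simp
    | none =>
      have hfin : ((PySem.List.enumerate index_cols).foldl
          (fun (finals : List Int) kc =>
            finals.map (fun f => if f ≥ normIns (kc.2 + kc.1) ((row.length:Int) + kc.1)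
                then f + 1 else f)
              ++ [normIns (kc.2 + kc.1) ((row.length:Int) + kc.1)]) [])
          = finalsOf index_cols row.length := by
        have h := enum_fold_floop row.length index_cols 0 []
        simp only [Nat.cast_zero, add_zero] at h
        rw [h, qs_comm]
        rfl
      have hmemd : ∀ j : Int, j ∈ PySem.Set.ofList (finalsOf index_cols row.length)
          ↔ j ∈ finalsOf index_cols row.length := by
        intro j; simp [PySem.Set.mem_ofList]
      have hstep : altStep index_cols (cache, acc) row
          = (PySem.Dict.insert cache ((row.length:Int))
               (PySem.Set.ofList (finalsOf index_cols row.length)),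
             acc ++ [rowFn index_cols row]) := by
        unfold altStep
        dsimp only
        rw [hget]
        dsimp only
        rw [hfin, rowB_eq_rowFn index_cols row _ hmemd]
      have hinv' : ∀ (z : Int) (d : List Int),
          PySem.Dict.get? (PySem.Dict.insert cache ((row.length:Int))
            (PySem.Set.ofList (finalsOf index_cols row.length))) z = some d →
          ∃ n : Nat, z = (n:Int) ∧ ∀ j : Int, j ∈ d ↔ j ∈ finalsOf index_cols n := by
        intro z d hz
        by_cases hzL : z = ((row.length:Int))
        · subst hzL
          rw [PySem.Dict.get?_insert_self] at hz
          refine ⟨row.length, rfl, ?_⟩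
          injection hz with h
          subst h
          exact hmemd
        · rw [PySem.Dict.get?_insert_of_ne _ _ hzL] at hz
          exact hinv _ _ hz
      rw [hstep, ih _ (acc ++ [rowFn index_cols row]) hinv']
      simp

lemma alt_eq_map (index_cols : List Int) (matrix : List (List String)) :
    add_cols_alt index_cols matrix = matrix.map (rowFn index_cols) := by
  have h := alt_fold index_cols matrix PySem.Dict.empty []
    (by
      intro z d hz
      rw [PySem.Dict.get?_empty] at hz
      simp at hz)
  calc add_cols_alt index_cols matrix
      = (matrix.foldl (altStep index_cols) (PySem.Dict.empty, [])).2 := rfl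
    _ = [] ++ matrix.map (rowFn index_cols) := h
    _ = matrix.map (rowFn index_cols) := by simp

-- ===== VERDICT (by name: the statement is the Claim_ definition above) =====
theorem add_cols_spec : Claim_equal_add_cols := by
  intro index_cols matrix _
  show add_cols index_cols matrix = add_cols_alt index_cols matrix
  rw [add_cols, a_per_row index_cols 0 matrix, alt_eq_map]
  apply List.map_congr_left
  intro row _
  exact rowA_eq_rowFn index_cols row
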